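-- pv_equiv track=rewrite | github.com/RadzPrower/AdventOfCode2025 | Day06.py | cephalopod_parse
-- ===== SOURCE A (Python) =====
-- def cephalopod_parse(data):
--     j = 0
--     max_string_length = 0
--     segment_start = 0
--     cephalopod_data = []
--     for x in range(len(data)):
--         cephalopod_data.append([])
--         if len(data[x]) > max_string_length:
--             max_string_length = len(data[x])
--     for x in range(len(data)):
--         data[x] = data[x].ljust(max_string_length)
--     done = False
--     while not done:
--         char_set = set()
--         for i in range(len(data)):
--             char_set.add(data[i][j])
--         if char_set == {' '}:
--             cephalopod_data, segment_start = add_to_dataset(cephalopod_data, data, j, segment_start)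
--         j += 1
--         if j >= max_string_length:
--             cephalopod_data, segment_start = add_to_dataset(cephalopod_data, data, j, segment_start)
--             done = True
--     return cephalopod_data
--
-- def add_to_dataset(cephalopod_data, data, j, segment_start):
--     for i in range(len(data)):
--         cephalopod_data[i].append(data[i][segment_start:j])
--     return cephalopod_data, j + 1
-- ===== SOURCE B (Python) =====
-- def cephalopod_parse(data):
--     # Same in-place padding mutation of `data` as the original.
--     max_len = max(map(len, data), default=0)
--     for i in range(len(data)):
--         data[i] = data[i].ljust(max_len)
--     # Fold all rows into one mask string: ' ' exactly at the all-space columns.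
--     mask = ' ' * max_len
--     for row in data:
--         mask = ''.join(' ' if m == ' ' and c == ' ' else '#' for m, c in zip(mask, row))
--     # Split every row at the mask's spaces via a sentinel that printable input never contains.
--     return [''.join(c if m != ' ' else '\x00' for m, c in zip(mask, row)).split('\x00')
--             for row in data]
-- ===== Notes on version B (the rewrite author's own statement) =====
-- stated objective: alternative
-- what changed: Instead of A's column-major scan that builds a Python set per column and emits segments on the fly, B folds all rows into a single separator-mask string (a character zip-reduce), overlays each row with a sentinel character at the mask's spaces, and obtains the segments with str.split on the sentinel - no column loop and no explicit slicing.
-- outside the precondition, e.g. on cephalopod_parse(['']): A raises IndexError, B returns [['']]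
-- crash fix: On a non-empty list whose strings are all empty, A raises IndexError (it indexes column 0 of empty rows); B returns one single-empty-string segment per row, e.g. [['']] for ['']. — e.g. on cephalopod_parse([""]): A raises IndexError, B returns [[""]]
import Mathlib
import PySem

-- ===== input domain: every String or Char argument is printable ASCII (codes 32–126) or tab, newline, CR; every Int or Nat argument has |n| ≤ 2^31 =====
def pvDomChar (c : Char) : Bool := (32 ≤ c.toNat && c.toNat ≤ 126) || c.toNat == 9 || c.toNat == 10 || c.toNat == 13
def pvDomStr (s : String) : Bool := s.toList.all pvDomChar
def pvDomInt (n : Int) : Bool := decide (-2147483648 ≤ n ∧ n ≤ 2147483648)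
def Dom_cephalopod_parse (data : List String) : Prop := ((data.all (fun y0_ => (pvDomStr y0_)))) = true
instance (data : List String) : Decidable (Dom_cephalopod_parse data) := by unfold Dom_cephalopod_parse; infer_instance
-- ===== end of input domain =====

-- B replaces A's column-major set-per-column scan by a mask fold over the rows plus a sentinel str.split per row
-- (a structurally different algorithm of the same cost); A mutates its argument in place (ljust padding) —
-- the equivalence proved here is about the RETURN value only (B performs the same mutation in Python).

-- ===== PORT A =====
-- add_to_dataset: appends data[i][segment_start:j] to each row's segment list (returned segStart j+1 is inlined at call sites)
def cephA_add (ceph : List (List String)) (rows : List (List Char)) (segStart j : Nat) : List (List String) :=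
  List.zipWith (fun c r => c ++ [String.ofList (PySem.List.slice r (some (segStart : Int)) (some (j : Int)))]) ceph rows

-- the `while not done` loop; fuel only makes the recursion structural (the loop runs at most maxLen+1 iterations)
def cephA_loop (rows : List (List Char)) (maxLen : Nat) : Nat → Nat → Nat → List (List String) → List (List String)
  | 0, _, _, ceph => ceph
  | fuel + 1, j, segStart, ceph =>
    -- char_set = set(); for i …: char_set.add(data[i][j]); data[i][j] raises IndexError where pyGet? is none — excluded by Pre_
    let charSet : PySem.Set Char :=
      rows.foldl (fun s r => PySem.Set.add s ((PySem.List.pyGet? r (j : Int)).getD ' ')) PySem.Set.empty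
    if PySem.Set.equal charSet (PySem.Set.ofList [' ']) then
      let ceph' := cephA_add ceph rows segStart j
      if maxLen ≤ j + 1 then cephA_add ceph' rows (j + 1) (j + 1)
      else cephA_loop rows maxLen fuel (j + 1) (j + 1) ceph'
    else
      if maxLen ≤ j + 1 then cephA_add ceph rows segStart (j + 1)
      else cephA_loop rows maxLen fuel (j + 1) segStart ceph

def cephalopod_parse (data : List String) : List (List String) :=
  -- first loop: cephalopod_data.append([]) and the running max of the lengths, in one pass
  let p := data.foldl
    (fun (p : List (List String) × Nat) s =>
      (p.1 ++ [([] : List String)], if p.2 < s.toList.length then s.toList.length else p.2))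
    ([], 0)
  -- second loop: data[x] = data[x].ljust(max_string_length)  (exact: ljust pads with spaces, never truncates)
  let rows := data.map (fun s => s.toList ++ List.replicate (p.2 - s.toList.length) ' ')
  cephA_loop rows p.2 (p.2 + 1) 0 0 p.1

-- ===== PORT B =====
def cephalopod_parse_alt (data : List String) : List (List String) :=
  -- max(map(len, data), default=0)
  let maxLen := match PySem.List.max? (data.map (fun s => s.toList.length)) (fun x => x) with
    | none => 0
    | some m => m
  -- data[i] = data[i].ljust(max_len)
  let rows := data.map (fun s => s.toList ++ List.replicate (maxLen - s.toList.length) ' ')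
  -- mask = ' ' * max_len; for row: mask = ''.join(' ' if m==' ' and c==' ' else '#' for m,c in zip(mask,row))
  let mask := rows.foldl
    (fun m r => List.zipWith (fun mc c => if mc == ' ' && c == ' ' then ' ' else '#') m r)
    (List.replicate maxLen ' ')
  -- [''.join(c if m != ' ' else '\x00' for m,c in zip(mask,row)).split('\x00') for row in data]
  rows.map (fun r =>
    (PySem.Chars.splitOn (List.zipWith (fun mc c => if mc != ' ' then c else Char.ofNat 0) mask r)
        [Char.ofNat 0]).map (fun cs => String.ofList cs))

-- ===== PRECONDITION & SPEC =====
-- Pre_ excludes exactly the inputs on which A raises IndexError: a non-empty list all of whose strings are empty.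
def Pre_cephalopod_parse (data : List String) : Prop :=
  data = [] ∨ ∃ s ∈ data, s.toList ≠ []
instance (data : List String) : Decidable (Pre_cephalopod_parse data) := by
  unfold Pre_cephalopod_parse; infer_instance
def pvWitness_cephalopod_parse : List String := ["ab c", "x  z"]

-- On a non-empty list of only empty strings A raises IndexError; B returns one empty segment per row.
def Raises_cephalopod_parse (data : List String) : Prop :=
  data ≠ [] ∧ ∀ s ∈ data, s.toList = []
instance (data : List String) : Decidable (Raises_cephalopod_parse data) := by
  unfold Raises_cephalopod_parse; infer_instance
def pvRaiseWitness_cephalopod_parse : List String := [""]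
def pvRaiseWitnessOut_cephalopod_parse : List (List String) := [[""]]

def Spec_cephalopod_parse (data : List String) (out : List (List String)) : Prop := out = cephalopod_parse_alt data
instance (data : List String) (out : List (List String)) : Decidable (Spec_cephalopod_parse data out) := by unfold Spec_cephalopod_parse; infer_instance

-- ===== CLAIM (what is proved, stated in full; the proofs are below) =====
def Claim_equal_cephalopod_parse : Prop := ∀ (data : List String), Dom_cephalopod_parse data → Pre_cephalopod_parse data → Spec_cephalopod_parse data (cephalopod_parse data)
def Claim_raises_cephalopod_parse : Prop := (∀ (data : List String), Dom_cephalopod_parse data → Raises_cephalopod_parse data → ¬ Pre_cephalopod_parse data) ∧ (Dom_cephalopod_parse (pvRaiseWitness_cephalopod_parse) ∧ Raises_cephalopod_parse (pvRaiseWitness_cephalopod_parse) ∧ cephalopod_parse_alt (pvRaiseWitness_cephalopod_parse) = pvRaiseWitnessOut_cephalopod_parse)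

-- ===== LEMMAS AND PROOFS =====

-- the common intermediate form: slice segments of one row, cut at the given boundaries
def cephSlices (st : Nat) (bs : List Nat) (r : List Char) : List (List Char) :=
  match bs with
  | [] => []
  | b :: bs => (r.drop st).take (b - st) :: cephSlices (b + 1) bs r

-- split of one row at the flagged positions (reference recursion for both sides)
def cephSegs : List Bool → List Char → List (List Char)
  | b :: bs, c :: cs => if b then [] :: cephSegs bs cs else (cephSegs bs cs).modifyHead (c :: ·)
  | _, _ => [[]]

-- str.split(d) as a plain left recursion
def cephSplit (d : Char) : List Char → List (List Char)
  | [] => [[]]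
  | c :: cs => if c == d then [] :: cephSplit d cs else (cephSplit d cs).modifyHead (c :: ·)

theorem equal_singleton_space (ys : List Char) (h : ys ≠ []) :
    PySem.Set.equal (PySem.Set.ofList ys) (PySem.Set.ofList [' ']) = ys.all (· == ' ') := by
  rcases Bool.eq_false_or_eq_true (ys.all (· == ' ')) with ha | ha'
  · simp only [ha]
    simp only [PySem.Set.equal]
    rw [Bool.and_eq_true]
    simp only [List.all_eq_true] at ha
    constructor
    · rw [PySem.Set.issubset_iff]; intro x hx
      rw [PySem.Set.mem_ofList] at hx
      have := ha x hx; simp at this; simp [PySem.Set.mem_ofList, this]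
    · rw [PySem.Set.issubset_iff]; intro x hx
      rw [PySem.Set.mem_ofList] at hx
      simp at hx; subst hx
      rcases ys with _ | ⟨y, t⟩
      · exact absurd rfl h
      · have := ha y (by simp); simp at this; subst this
        simp [PySem.Set.mem_ofList]
  · have ha := ha'
    simp only [ha]
    simp only [PySem.Set.equal, Bool.and_eq_false_iff]
    left
    rw [Bool.eq_false_iff]
    intro hsub
    rw [PySem.Set.issubset_iff] at hsub
    simp only [List.all_eq_false] at ha
    obtain ⟨x, hx, hxs⟩ := ha
    have := hsub x (by rw [PySem.Set.mem_ofList]; exact hx)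
    simp at this hxs
    exact hxs this

theorem foldl_add_eq_ofList_map {α β : Type} [BEq α] (l : List β) (f : β → α) :
    l.foldl (fun s b => PySem.Set.add s (f b)) PySem.Set.empty = PySem.Set.ofList (l.map f) := by
  rw [← PySem.Set.update_map_eq_foldl_add, PySem.Set.update_empty]

-- A's column test equals the all-space test, for a non-empty row list.
theorem cond_eq (rows : List (List Char)) (j : Nat) (h : rows ≠ []) :
    PySem.Set.equal
        (rows.foldl (fun s r => PySem.Set.add s ((PySem.List.pyGet? r (j : Int)).getD ' ')) PySem.Set.empty)
        (PySem.Set.ofList [' '])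
      = rows.all (fun r => (PySem.List.pyGet? r (j : Int)).getD ' ' == ' ') := by
  rw [foldl_add_eq_ofList_map, equal_singleton_space _ (by simpa using h), List.all_map]
  rfl

-- one boundary step of the intermediate fold form
def cephB_step (rows : List (List Char)) (st : Nat × List (List String)) (b : Nat) : Nat × List (List String) :=
  (b + 1, List.zipWith (fun c r => c ++ [String.ofList (PySem.List.slice r (some (st.1 : Int)) (some (b : Int)))]) st.2 rows)

-- A's while-loop equals the fold over the filtered boundaries, from any column j < maxLen.
theorem loopA_eq (rows : List (List Char)) (maxLen : Nat) (hrows : rows ≠ []) :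
    ∀ fuel j segStart ceph, j < maxLen → maxLen - j ≤ fuel →
      cephA_loop rows maxLen fuel j segStart ceph
        = (((((List.range' j (maxLen - j)).filter
              (fun (j : Nat) => rows.all (fun r => (PySem.List.pyGet? r (j : Int)).getD ' ' == ' '))) ++ [maxLen]).foldl
            (cephB_step rows) (segStart, ceph))).2 := by
  intro fuel
  induction fuel with
  | zero => intro j segStart ceph hj hfuel; omega
  | succ fuel ih =>
    intro j segStart ceph hj hfuel
    have hrange : List.range' j (maxLen - j) = j :: List.range' (j + 1) (maxLen - (j + 1)) := by
      have : maxLen - j = (maxLen - (j + 1)) + 1 := by omega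
      rw [this, List.range'_succ]
    rw [hrange]
    simp only [cephA_loop, cond_eq rows j hrows, List.filter_cons]
    by_cases hc : rows.all (fun r => (PySem.List.pyGet? r (j : Int)).getD ' ' == ' ') = true
    · simp only [hc]
      by_cases hend : maxLen ≤ j + 1
      · have hm : maxLen = j + 1 := by omega
        subst hm
        rw [if_pos (le_refl _)]
        simp [cephB_step, cephA_add]
      · rw [if_neg hend, ih (j + 1) (j + 1) (cephA_add ceph rows segStart j) (by omega) (by omega)]
        simp [cephB_step, cephA_add]
    · simp only [Bool.not_eq_true] at hc
      simp only [hc, Bool.false_eq_true, if_false]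
      by_cases hend : maxLen ≤ j + 1
      · have hm : maxLen = j + 1 := by omega
        subst hm
        rw [if_pos (le_refl _)]
        simp [cephB_step, cephA_add]
      · rw [if_neg hend, ih (j + 1) segStart ceph (by omega) (by omega)]

theorem zipWith_keep_left (ceph : List (List String)) : ∀ (rows : List (List Char)),
    ceph.length ≤ rows.length →
    List.zipWith (fun (c : List String) (_ : List Char) => c) ceph rows = ceph := by
  induction ceph with
  | nil => intro rows _; simp
  | cons c ct ih =>
    intro rows h
    rcases rows with _ | ⟨r, rt⟩
    · simp at h
    · simp only [List.zipWith_cons_cons, ih rt (by simp at h; omega)]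

theorem zipWith_fuse (g : List String → List Char → List String) (h2 : List Char → List String)
    (ceph : List (List String)) : ∀ (rows : List (List Char)),
    List.zipWith (fun c r => c ++ h2 r) (List.zipWith g ceph rows) rows
      = List.zipWith (fun c r => g c r ++ h2 r) ceph rows := by
  induction ceph with
  | nil => intro rows; simp
  | cons c ct ih =>
    intro rows
    rcases rows with _ | ⟨r, rt⟩
    · simp
    · simp only [List.zipWith_cons_cons, ih rt]

-- the boundary fold, row by row
theorem fold_to_rows (bs : List Nat) : ∀ (rows : List (List Char)) (st : Nat) (ceph : List (List String)),
    ceph.length ≤ rows.length →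
    ((bs.foldl (cephB_step rows) (st, ceph))).2
      = List.zipWith (fun c r => c ++ (cephSlices st bs r).map String.ofList) ceph rows := by
  induction bs with
  | nil =>
    intro rows st ceph hlen
    simp only [List.foldl_nil, cephSlices, List.map_nil, List.append_nil]
    exact (zipWith_keep_left ceph rows hlen).symm
  | cons b bt ih =>
    intro rows st ceph hlen
    simp only [List.foldl_cons, cephB_step]
    rw [ih rows (b + 1) _ (by rw [List.length_zipWith]; omega), zipWith_fuse]
    congr 1
    funext c r
    simp [cephSlices, PySem.List.slice_natCast, List.append_assoc]

-- shifting every cut and the row head by one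
theorem cephSlices_shift (bs : List Nat) : ∀ (st : Nat) (c : Char) (cs : List Char),
    cephSlices (st + 1) (bs.map (· + 1)) (c :: cs) = cephSlices st bs cs := by
  induction bs with
  | nil => intro st c cs; rfl
  | cons b bt ih =>
    intro st c cs
    simp only [List.map_cons, cephSlices, List.drop_succ_cons, Nat.add_sub_add_right,
      ih (b + 1) c cs]

theorem cephSlices_cons (bs : List Nat) (hbs : bs ≠ []) (c : Char) (cs : List Char) :
    cephSlices 0 (bs.map (· + 1)) (c :: cs) = (cephSlices 0 bs cs).modifyHead (c :: ·) := by
  rcases bs with _ | ⟨b, bt⟩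
  · exact absurd rfl hbs
  · simp only [List.map_cons, cephSlices, List.drop_zero, Nat.sub_zero, List.take_succ_cons,
      List.modifyHead_cons, cephSlices_shift bt (b + 1) c cs]

-- slicing at the flagged cuts is the flag recursion
theorem cephSlices_eq_segs (cs : List Char) : ∀ (P : Nat → Bool),
    cephSlices 0 (((List.range cs.length).filter P) ++ [cs.length]) cs
      = cephSegs ((List.range cs.length).map P) cs := by
  induction cs with
  | nil => intro P; simp [cephSlices, cephSegs]
  | cons c ct ih =>
    intro P
    have hr : List.range (ct.length + 1) = 0 :: (List.range ct.length).map (· + 1) := by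
      simp [List.range_succ_eq_map]
    simp only [List.length_cons, hr, List.filter_cons, List.map_cons, List.filter_map,
      List.map_map]
    by_cases h0 : P 0 = true
    · have hsh : cephSlices 1 ((((List.range ct.length).filter (P ∘ (· + 1))).map (· + 1)) ++ [ct.length + 1]) (c :: ct)
          = cephSlices 0 (((List.range ct.length).filter (P ∘ (· + 1))) ++ [ct.length]) ct := by
        simpa [List.map_append] using
          cephSlices_shift (((List.range ct.length).filter (P ∘ (· + 1))) ++ [ct.length]) 0 c ct
      simp only [h0, if_true, List.cons_append, cephSlices]
      rw [hsh, ih (P ∘ (· + 1))]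
      simp [cephSegs]
    · simp only [Bool.not_eq_true] at h0
      have hmap : (((List.range ct.length).filter (P ∘ (· + 1))).map (· + 1)) ++ [ct.length + 1]
          = ((((List.range ct.length).filter (P ∘ (· + 1))) ++ [ct.length])).map (· + 1) := by
        simp [List.map_append]
      simp only [h0, Bool.false_eq_true, if_false]
      rw [hmap, cephSlices_cons _ (by simp) c ct, ih (P ∘ (· + 1))]
      simp [cephSegs]

-- splitOn a sentinel that the row never contains is the flag recursion
theorem cephSplit_eq_segs (bs : List Bool) : ∀ (cs : List Char),
    bs.length = cs.length → (∀ c ∈ cs, c ≠ Char.ofNat 0) →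
    cephSplit (Char.ofNat 0) (List.zipWith (fun b c => if b then Char.ofNat 0 else c) bs cs)
      = cephSegs bs cs := by
  induction bs with
  | nil =>
    intro cs h _
    have hcs : cs = [] := by cases cs <;> simp_all
    subst hcs; rfl
  | cons b bt ih =>
    intro cs hlen hnul
    rcases cs with _ | ⟨c, ct⟩
    · simp at hlen
    · have ihx := ih ct (by simpa using hlen) (fun x hx => hnul x (by simp [hx]))
      cases b
      · have hc : (c == Char.ofNat 0) = false := by simpa using hnul c (by simp)
        simp only [List.zipWith_cons_cons, Bool.false_eq_true, if_false, cephSplit, hc, cephSegs,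
          ihx]
      · simp only [List.zipWith_cons_cons, if_true, cephSplit, beq_self_eq_true, cephSegs, ihx]

theorem cephSplit_ne_nil (d : Char) (cs : List Char) : cephSplit d cs ≠ [] := by
  induction cs with
  | nil => simp [cephSplit]
  | cons c ct ih =>
    simp only [cephSplit]
    split
    · simp
    · rcases h : cephSplit d ct with _ | ⟨x, xs⟩
      · exact absurd h ih
      · simp

-- PySem's fueled splitOn is the plain recursion cephSplit, for a single-character separator
theorem splitOn_go_eq (d : Char) : ∀ (fuel : Nat) (l cur : List Char) (acc : List (List Char)),
    l.length < fuel →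
    PySem.Chars.splitOn.go [d] fuel l cur acc
      = acc.reverse ++ (cephSplit d l).modifyHead (cur.reverse ++ ·) := by
  intro fuel
  induction fuel with
  | zero => intro l cur acc h; omega
  | succ fuel ih =>
    intro l cur acc h
    rcases l with _ | ⟨c, rest⟩
    · simp [PySem.Chars.splitOn.go, cephSplit]
    · rw [PySem.Chars.splitOn.go.eq_def]
      simp only []
      by_cases hdc : ([d].isPrefixOf (c :: rest)) = true
      · have hcd : c = d := by simp [List.isPrefixOf] at hdc; exact hdc.symm
        simp only [hdc, if_true, List.length_cons, List.length_nil, List.drop_succ_cons,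
          List.drop_zero]
        rw [ih rest [] (cur.reverse :: acc) (by simp at h; omega)]
        have : cephSplit d (c :: rest) = [] :: cephSplit d rest := by
          simp [cephSplit, hcd]
        simp [this]
        rcases cephSplit d rest with _ | ⟨x, xs⟩ <;> simp
      · have hcd : ¬ c = d := by
          intro hc; subst hc; simp [List.isPrefixOf] at hdc
        simp only [hdc]
        rw [if_neg (by simp), ih rest (c :: cur) acc (by simp at h; omega)]
        have hsp : cephSplit d (c :: rest) = (cephSplit d rest).modifyHead (c :: ·) := by
          simp [cephSplit, hcd]
        rcases hx : cephSplit d rest with _ | ⟨x, xs⟩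
        · exact absurd hx (cephSplit_ne_nil d rest)
        · simp [hsp, hx]

theorem splitOn_eq_cephSplit (d : Char) (l : List Char) :
    PySem.Chars.splitOn l [d] = cephSplit d l := by
  rw [PySem.Chars.splitOn, splitOn_go_eq d (l.length + 1) l [] [] (by omega)]
  rcases hx : cephSplit d l with _ | ⟨x, xs⟩
  · exact absurd hx (cephSplit_ne_nil d l)
  · simp

-- zipWith against a map over range, pointwise
theorem zipWith_map_range {α β γ : Type} (f : β → α → γ) (g : Nat → β) (n : Nat)
    (r : List α) (hr : r.length = n) (d : α) :
    List.zipWith f ((List.range n).map g) r = (List.range n).map (fun j => f (g j) (r.getD j d)) := by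
  apply List.ext_getElem
  · simp [hr]
  · intro i h1 h2
    simp only [List.getElem_zipWith, List.getElem_map, List.getElem_range]
    rw [List.getD_eq_getElem r d (by simp at h2; omega)]

-- the mask fold computes the all-space flags, column by column
theorem mask_fold (n : Nat) : ∀ (rows : List (List Char)), (∀ r ∈ rows, r.length = n) → ∀ (Q : Nat → Bool),
    rows.foldl
        (fun m r => List.zipWith (fun mc c => if mc == ' ' && c == ' ' then ' ' else '#') m r)
        ((List.range n).map (fun j => if Q j then ' ' else '#'))
      = (List.range n).map
          (fun j => if Q j && rows.all (fun r => r.getD j ' ' == ' ') then ' ' else '#') := by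
  intro rows
  induction rows with
  | nil => intro _ Q; simp
  | cons r rs ih =>
    intro h Q
    simp only [List.foldl_cons]
    rw [zipWith_map_range _ _ n r (h r (by simp)) ' ']
    have hpt : (List.range n).map
          (fun j => if (if Q j then ' ' else '#') == ' ' && r.getD j ' ' == ' ' then ' ' else '#')
        = (List.range n).map (fun j => if (Q j && (r.getD j ' ' == ' ')) then ' ' else '#') := by
      apply List.map_congr_left
      intro j _
      by_cases hq : Q j = true <;> simp [hq]
    rw [hpt, ih (fun x hx => h x (by simp [hx])) (fun j => Q j && (r.getD j ' ' == ' '))]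
    apply List.map_congr_left
    intro j _
    simp [List.all_cons, Bool.and_assoc]

-- A's first loop: the pair fold builds (one empty list per row, the running max of lengths).
theorem foldA_first (data : List String) :
    data.foldl
        (fun (p : List (List String) × Nat) s =>
          (p.1 ++ [([] : List String)], if p.2 < s.toList.length then s.toList.length else p.2))
        ([], 0)
      = (data.map (fun _ => ([] : List String)),
         (data.map (fun s => s.toList.length)).foldl max 0) := by
  have h : ∀ (l : List String) (acc : List (List String)) (m : Nat),
      l.foldl
          (fun (p : List (List String) × Nat) s =>
            (p.1 ++ [([] : List String)], if p.2 < s.toList.length then s.toList.length else p.2))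
          (acc, m)
        = (acc ++ l.map (fun _ => ([] : List String)), (l.map (fun s => s.toList.length)).foldl max m) := by
    intro l
    induction l with
    | nil => simp
    | cons x t iht =>
      intro acc m
      simp only [List.foldl_cons, List.map_cons, iht, List.append_assoc, List.singleton_append]
      congr 2
      split <;> omega
  simpa using h data [] 0

-- B's max(map(len, data), default=0) equals A's running max.
theorem maxB_eq (data : List String) :
    (match PySem.List.max? (data.map (fun s => s.toList.length)) (fun x => x) with
      | none => 0
      | some m => m)
      = (data.map (fun s => s.toList.length)).foldl max 0 := by
  rcases data with _ | ⟨x, t⟩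
  · rfl
  · simp only [List.map_cons, PySem.List.max?_id_cons, List.foldl_cons, Nat.zero_max]

-- every length is ≤ the running max
theorem len_le_foldl_max (data : List String) (s : String) (hs : s ∈ data) :
    s.toList.length ≤ (data.map (fun s => s.toList.length)).foldl max 0 :=
by
  rw [List.foldl_map]
  exact ((PySem.List.le_foldl_max_nat data (fun s => s.toList.length) 0).2) s hs

-- ===== VERDICT (by name: the statement is the Claim_ definition above) =====
theorem cephalopod_parse_spec : Claim_equal_cephalopod_parse := by
  intro data hdom hpre
  simp only [Spec_cephalopod_parse, cephalopod_parse, cephalopod_parse_alt]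
  rcases data with _ | ⟨d0, ds⟩
  · rfl
  · set data := d0 :: ds with hdata
    rw [foldA_first, maxB_eq]
    set maxLen := (data.map (fun s => s.toList.length)).foldl max 0 with hml
    have hml1 : 1 ≤ maxLen := by
      rcases hpre with h | ⟨s, hs, hne⟩
      · simp [hdata] at h
      · have h1 := len_le_foldl_max data s hs
        have h2 : 0 < s.toList.length := List.length_pos_of_ne_nil hne
        omega
    set rows := data.map (fun s => s.toList ++ List.replicate (maxLen - s.toList.length) ' ') with hrows
    have hrne : rows ≠ [] := by simp [hrows, hdata]
    have hrowlen : ∀ r ∈ rows, r.length = maxLen := by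
      intro r hr
      rw [hrows] at hr
      obtain ⟨s, hs, rfl⟩ := List.mem_map.mp hr
      have := len_le_foldl_max data s hs
      simp only [List.length_append, List.length_replicate]; omega
    rw [loopA_eq rows maxLen hrne (maxLen + 1) 0 0 _ (by omega) (by omega), Nat.sub_zero,
      ← List.range_eq_range',
      fold_to_rows _ rows 0 _ (by simp [hrows, hdata])]
    -- the separator predicate, in its List.getD normal form
    set P : Nat → Bool := fun j => rows.all (fun r => (PySem.List.pyGet? r (j : Int)).getD ' ' == ' ') with hPdef
    have hP : ∀ j : Nat, P j = rows.all (fun r => r.getD j ' ' == ' ') := by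
      intro j
      simp [hPdef, PySem.List.pyGet?_natCast, List.getD_eq_getElem?_getD]
    -- the mask is the separator flags rendered as characters
    have hinit : (List.replicate maxLen ' ') = (List.range maxLen).map (fun j => if (fun (_ : Nat) => true) j then ' ' else '#') := by
      simp [List.map_const']
    have hmask : rows.foldl
          (fun m r => List.zipWith (fun mc c => if mc == ' ' && c == ' ' then ' ' else '#') m r)
          (List.replicate maxLen ' ')
        = (List.range maxLen).map (fun j => if P j then ' ' else '#') := by
      rw [hinit, mask_fold maxLen rows hrowlen (fun _ => true)]
      apply List.map_congr_left
      intro j _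
      simp [hP]
    rw [hmask]
    -- row by row
    rw [hrows, List.zipWith_map, List.zipWith_self, List.map_map]
    apply List.map_congr_left
    intro s hs
    simp only [Function.comp_apply, List.nil_append]
    set r := s.toList ++ List.replicate (maxLen - s.toList.length) ' ' with hrdef
    have hr : r.length = maxLen := by
      have := len_le_foldl_max data s hs
      simp only [hrdef, List.length_append, List.length_replicate]; omega
    have hnul : ∀ c ∈ r, c ≠ Char.ofNat 0 := by
      intro c hc hceq
      rcases List.mem_append.mp hc with hc1 | hc2
      · have hdc : pvDomChar c = true := by
          have hsd : pvDomStr s = true := by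
            have := List.all_eq_true.mp hdom s hs
            simpa using this
          exact List.all_eq_true.mp hsd c hc1
        rw [hceq] at hdc
        simp [pvDomChar] at hdc
      · have : c = ' ' := List.eq_of_mem_replicate hc2
        rw [this] at hceq
        exact absurd (congrArg Char.toNat hceq) (by decide)
    -- B side: the overlay is the flag form, and splitOn is the flag recursion
    have hov : List.zipWith (fun mc c => if mc != ' ' then c else Char.ofNat 0)
          ((List.range maxLen).map (fun j => if P j then ' ' else '#')) r
        = List.zipWith (fun b c => if b then Char.ofNat 0 else c) ((List.range maxLen).map P) r := by
      rw [zipWith_map_range _ _ maxLen r hr ' ', zipWith_map_range _ _ maxLen r hr ' ']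
      apply List.map_congr_left
      intro j _
      by_cases hq : P j = true <;> simp [hq]
    have hslices := cephSlices_eq_segs r P
    rw [hr] at hslices
    rw [hov, splitOn_eq_cephSplit,
      cephSplit_eq_segs ((List.range maxLen).map P) r (by simp [hr]) hnul, hslices]

def cephalopod_parse_raises : Claim_raises_cephalopod_parse := by
  unfold Claim_raises_cephalopod_parse
  refine ⟨?_, ⟨by decide, by decide, by rfl⟩⟩
  intro data _ hr hpre
  rcases hpre with h | ⟨s, hs, hne⟩
  · exact hr.1 h
  · exact hne (hr.2 s hs)
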